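-- pv_equiv track=rewrite | github.com/tobiasgrosser/NeuralCasting | neural_cast/frontend/parser/ops/relu.py | _gen_for_loop_index
-- ===== SOURCE A (Python) =====
-- def _gen_for_loop_index(shape : list[int]) -> str:
--     code : str = ""
--     n_dims : int = len(shape)
--     for i in range(n_dims):
--         index : str = "i" + str(i)
--         size : int = 1
--         for j in range(i+1, n_dims):
--             size *= shape[j]
--         code += index + "*" + str(size)
--         if i < n_dims-1:
--             code += " + "
--     return code
-- ===== SOURCE B (Python) =====
-- def _gen_for_loop_index(shape : list[int]) -> str:
--     terms = []
--     size = 1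
--     for i, d in reversed(list(enumerate(shape))):
--         terms.append("i" + str(i) + "*" + str(size))
--         size *= d
--     return " + ".join(reversed(terms))
-- ===== Notes on version B (the rewrite author's own statement) =====
-- stated objective: faster
-- what changed: B replaces the inner loop that recomputes each suffix product from scratch by a single reverse pass that accumulates the running suffix product and collects the terms, then joins them with ' + '.
import Mathlib
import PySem

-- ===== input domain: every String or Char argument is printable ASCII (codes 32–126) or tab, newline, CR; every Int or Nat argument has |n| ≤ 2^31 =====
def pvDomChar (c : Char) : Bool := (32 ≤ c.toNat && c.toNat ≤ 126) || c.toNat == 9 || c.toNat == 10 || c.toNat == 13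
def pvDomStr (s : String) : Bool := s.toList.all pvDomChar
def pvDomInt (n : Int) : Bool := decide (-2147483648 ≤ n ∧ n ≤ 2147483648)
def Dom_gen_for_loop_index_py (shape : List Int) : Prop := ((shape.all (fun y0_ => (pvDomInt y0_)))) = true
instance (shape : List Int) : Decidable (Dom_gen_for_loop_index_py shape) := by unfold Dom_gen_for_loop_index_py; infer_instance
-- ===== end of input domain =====

-- B replaces A's quadratic inner suffix-product loop by one reverse pass with a running
-- suffix product (objective: faster, asymptotic O(n^2) -> O(n) multiplications).

-- ===== PORT A =====
def gen_for_loop_index_py (shape : List Int) : String :=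
  let n_dims : Int := shape.length
  (PySem.List.pyRange 0 n_dims 1).foldl (fun code i =>
    let index : String := "i" ++ PySem.Int.toStr i
    let size : Int := (PySem.List.pyRange (i + 1) n_dims 1).foldl
      (fun s j => s * PySem.List.pyGetD shape j 0) 1
    let code := code ++ (index ++ "*" ++ PySem.Int.toStr size)
    if i < n_dims - 1 then code ++ " + " else code) ""

-- ===== PORT B =====
def gen_for_loop_index_py_alt (shape : List Int) : String :=
  let st := ((PySem.List.enumerate shape 0).reverse).foldl
    (fun (acc : List String × Int) p =>
      (acc.1 ++ ["i" ++ PySem.Int.toStr p.1 ++ "*" ++ PySem.Int.toStr acc.2], acc.2 * p.2))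
    ([], 1)
  PySem.Str.join " + " st.1.reverse

-- ===== PRECONDITION & SPEC =====
def Spec_gen_for_loop_index_py (shape : List Int) (out : String) : Prop := out = gen_for_loop_index_py_alt shape
instance (shape : List Int) (out : String) : Decidable (Spec_gen_for_loop_index_py shape out) := by unfold Spec_gen_for_loop_index_py; infer_instance

-- ===== CLAIM (what is proved, stated in full; the proofs are below) =====
def Claim_equal_gen_for_loop_index_py : Prop := ∀ (shape : List Int), Dom_gen_for_loop_index_py shape → Spec_gen_for_loop_index_py shape (gen_for_loop_index_py shape)

-- ===== LEMMAS AND PROOFS =====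

-- product as A's inner loop computes it
def prodA (xs : List Int) : Int := xs.foldl (· * ·) 1
-- product as B accumulates it (reverse order)
def prodB (sz : Int) : List Int → Int
  | [] => sz
  | x :: xs => prodB sz xs * x

-- the list of terms "i<k>*<suffix product>" for the suffix xs starting at index i
def termsOf (i : Int) : List Int → List String
  | [] => []
  | _ :: xs => ("i" ++ PySem.Int.toStr i ++ "*" ++ PySem.Int.toStr (prodA xs)) :: termsOf (i + 1) xs

-- B's terms with an accumulated base size sz
def termsB (sz : Int) (s : Int) : List Int → List String
  | [] => []
  | _ :: xs => ("i" ++ PySem.Int.toStr s ++ "*" ++ PySem.Int.toStr (prodB sz xs)) :: termsB sz (s + 1) xs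

-- A's separator discipline: " + " after every term except the last
def joinA : List String → String
  | [] => ""
  | [t] => t
  | t :: u :: r => t ++ " + " ++ joinA (u :: r)

theorem prodA_eq_prod (xs : List Int) : prodA xs = xs.prod := List.prod_eq_foldl.symm

theorem prodB_eq (sz : Int) (xs : List Int) : prodB sz xs = sz * prodA xs := by
  induction xs generalizing sz with
  | nil => simp [prodB, prodA]
  | cons x xs ih =>
      rw [prodB, ih, prodA_eq_prod, prodA_eq_prod, List.prod_cons]; ring

theorem join_eq_joinA (l : List String) : PySem.Str.join " + " l = joinA l := by
  induction l with
  | nil =>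
      rw [← String.toList_inj]
      simp [PySem.Str.toList_join, PySem.Chars.join_nil, joinA]
  | cons t r ih =>
      cases r with
      | nil =>
          rw [← String.toList_inj]
          simp [PySem.Str.toList_join, PySem.Chars.join_singleton, joinA]
      | cons u r' =>
          rw [← String.toList_inj] at ih ⊢
          simp only [PySem.Str.toList_join, List.map_cons, PySem.Chars.join_cons_cons, joinA,
            String.toList_append] at ih ⊢
          rw [ih]

theorem termsB_one (xs : List Int) : ∀ (s : Int), termsB 1 s xs = termsOf s xs := by
  induction xs with
  | nil => intro s; rfl
  | cons x xs ih => intro s; rw [termsB, termsOf, ih, prodB_eq, one_mul]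

theorem lemA (suf : List Int) : ∀ (pre : List Int) (c : String),
    (PySem.List.pyRange ((pre.length : Int)) (((pre ++ suf).length : Int)) 1).foldl
      (fun code i =>
        let index : String := "i" ++ PySem.Int.toStr i
        let size : Int := (PySem.List.pyRange (i + 1) (((pre ++ suf).length : Int)) 1).foldl
          (fun s j => s * PySem.List.pyGetD (pre ++ suf) j 0) 1
        let code := code ++ (index ++ "*" ++ PySem.Int.toStr size)
        if i < (((pre ++ suf).length : Int)) - 1 then code ++ " + " else code) c
    = c ++ joinA (termsOf ((pre.length : Int)) suf) := by
  induction suf with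
  | nil =>
      intro pre c
      rw [PySem.List.pyRange_one_eq_nil (by simp)]
      simp [joinA, termsOf]
  | cons d suf ih =>
      intro pre c
      have hlt : ((pre.length : Int)) < (((pre ++ d :: suf).length : Int)) := by
        simp only [List.length_append, List.length_cons]; push_cast; omega
      rw [PySem.List.pyRange_one_cons hlt, List.foldl_cons]
      have hsize : (PySem.List.pyRange (((pre.length : Int)) + 1) (((pre ++ d :: suf).length : Int)) 1).foldl
          (fun s j => s * PySem.List.pyGetD (pre ++ d :: suf) j 0) 1 = prodA suf := by
        rw [PySem.List.foldl_pyRange_pyGetD' (pre ++ d :: suf) 0 (fun s x => s * x) 1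
          (a := ((pre.length : Int)) + 1) (by positivity)]
        have hdrop : (pre ++ d :: suf).drop (((pre.length : Int)) + 1).toNat = suf := by
          have h1 : (((pre.length : Int)) + 1).toNat = pre.length + 1 := by omega
          rw [h1, show pre.length + 1 = (pre ++ [d]).length by simp,
            show pre ++ d :: suf = (pre ++ [d]) ++ suf by simp]
          simp
        rw [hdrop]; rfl
      rw [hsize]
      cases suf with
      | nil =>
          rw [if_neg (by simp only [List.length_append, List.length_cons, List.length_nil]; push_cast; omega)]
          rw [PySem.List.pyRange_one_eq_nil (by simp)]
          simp [termsOf, joinA, String.append_assoc]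
      | cons e suf' =>
          rw [if_pos (by simp only [List.length_append, List.length_cons]; push_cast; omega)]
          rw [show pre ++ d :: e :: suf' = (pre ++ [d]) ++ e :: suf' by simp,
            show ((pre.length : Int)) + 1 = (((pre ++ [d]).length : Int)) by simp]
          rw [ih (pre ++ [d])]
          simp only [termsOf, joinA, List.length_append, List.length_cons, List.length_nil]
          push_cast
          simp [String.append_assoc]

theorem lemB (xs : List Int) : ∀ (s : Int) (ts : List String) (sz : Int),
    ((PySem.List.enumerate xs s).reverse).foldl
      (fun (acc : List String × Int) p =>
        (acc.1 ++ ["i" ++ PySem.Int.toStr p.1 ++ "*" ++ PySem.Int.toStr acc.2], acc.2 * p.2))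
      (ts, sz)
    = (ts ++ (termsB sz s xs).reverse, prodB sz xs) := by
  induction xs with
  | nil => intro s ts sz; simp [PySem.List.enumerate, termsB, prodB]
  | cons x xs ih =>
      intro s ts sz
      rw [PySem.List.enumerate_cons, List.reverse_cons, List.foldl_append, ih]
      simp [termsB, prodB, List.append_assoc]

-- ===== VERDICT (by name: the statement is the Claim_ definition above) =====
theorem gen_for_loop_index_py_spec : Claim_equal_gen_for_loop_index_py := by
  intro shape _
  unfold Spec_gen_for_loop_index_py
  have hA := lemA shape [] ""
  simp only [List.nil_append, List.length_nil, Nat.cast_zero] at hA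
  have hB := lemB shape 0 [] 1
  simp only [gen_for_loop_index_py, gen_for_loop_index_py_alt]
  rw [hB]
  simp only [List.nil_append, List.reverse_reverse, termsB_one]
  rw [hA]
  simp [join_eq_joinA]
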